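-- pv_equiv track=rewrite | github.com/phongddo/boltffi | benchmarks/scripts/audit_benchmark_catalog.py | strip_tool_prefix
-- ===== SOURCE A (Python) =====
-- def strip_tool_prefix(name: str) -> str:
--     stripped = name
--     changed = True
--     while changed:
--         changed = False
--         for prefix in ("boltffi_", "uniffi_", "wasmbindgen_", "ffm_", "java_"):
--             if stripped.startswith(prefix):
--                 stripped = stripped.removeprefix(prefix)
--                 changed = True
--     return stripped
-- ===== SOURCE B (Python) =====
-- def strip_tool_prefix(name: str) -> str:
--     # Advance an index over the leading run of known prefixes; one slice at the end
--     # (no repeated string copies, no changed-flag re-scan loop).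
--     i = 0
--     while True:
--         for prefix in ("boltffi_", "uniffi_", "wasmbindgen_", "ffm_", "java_"):
--             if name.startswith(prefix, i):
--                 i += len(prefix)
--                 break
--         else:
--             return name[i:]
-- ===== Notes on version B (the rewrite author's own statement) =====
-- stated objective: alternative
-- what changed: A repeatedly re-scans with a changed flag and builds a new string at every removeprefix; B advances a single index over the leading run of prefixes and slices once at the end, with no changed flag and no intermediate string copies.
import Mathlib
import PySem

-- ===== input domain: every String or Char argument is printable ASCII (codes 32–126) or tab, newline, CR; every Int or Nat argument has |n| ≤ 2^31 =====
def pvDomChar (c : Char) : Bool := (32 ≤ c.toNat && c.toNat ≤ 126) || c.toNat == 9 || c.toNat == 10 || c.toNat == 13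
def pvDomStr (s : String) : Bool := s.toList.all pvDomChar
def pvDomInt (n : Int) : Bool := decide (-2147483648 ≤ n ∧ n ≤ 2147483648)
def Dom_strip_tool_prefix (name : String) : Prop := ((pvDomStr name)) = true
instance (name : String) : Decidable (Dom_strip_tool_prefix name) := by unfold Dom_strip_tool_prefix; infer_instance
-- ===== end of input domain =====

-- B replaces A's changed-flag rescan loop (which copies the string at every strip) by a
-- single index advanced over the leading run of prefixes, with one slice at the end.

-- ===== PORT A =====
-- the prefix tuple of A, as lists of chars
def pvPrefixes : List (List Char) :=
  ["boltffi_".toList, "uniffi_".toList, "wasmbindgen_".toList, "ffm_".toList, "java_".toList]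

-- body of A's inner 'for' loop: state = (stripped, changed)
def pvPassStep (st : List Char × Bool) (p : List Char) : List Char × Bool :=
  if p.isPrefixOf st.1 then (st.1.drop p.length, true) else st

-- one iteration of A's 'while' body: changed = False; for prefix in (...): ...
def pvPassA (s : List Char) : List Char × Bool :=
  pvPrefixes.foldl pvPassStep (s, false)

-- termination helpers for the while loop (the port cites them in decreasing_by)
theorem pvPass_le (ps : List (List Char)) (t : List Char) (ch : Bool) :
    ((ps.foldl pvPassStep (t, ch)).1).length ≤ t.length := by
  induction ps generalizing t ch with
  | nil => simp
  | cons p ps ih =>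
    simp only [List.foldl, pvPassStep]
    by_cases h : p.isPrefixOf t
    · simp only [h, if_pos]
      exact le_trans (ih _ _) (by simp)
    · simp only [h]
      exact ih t ch

theorem pvPass_lt (ps : List (List Char)) (hps : ∀ p ∈ ps, 0 < p.length) :
    ∀ (t : List Char) (ch : Bool), ((ps.foldl pvPassStep (t, ch)).2 = true) →
      ch = true ∨ ((ps.foldl pvPassStep (t, ch)).1).length < t.length := by
  induction ps with
  | nil => intro t ch h; simp at h; exact Or.inl h
  | cons p ps ih =>
    intro t ch h
    simp only [List.foldl, pvPassStep] at h ⊢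
    by_cases hp : p.isPrefixOf t
    · simp only [hp, if_pos] at h ⊢
      right
      have hlen : p.length ≤ t.length :=
        (List.isPrefixOf_iff_prefix.mp hp).length_le
      have hpos : 0 < p.length := hps p (by simp)
      calc ((ps.foldl pvPassStep (t.drop p.length, true)).1).length
          ≤ (t.drop p.length).length := pvPass_le ps _ _
        _ < t.length := by simp [List.length_drop]; omega
    · simp only [hp] at h ⊢
      rcases ih (fun q hq => hps q (by simp [hq])) t ch h with h1 | h1
      · exact Or.inl h1
      · exact Or.inr h1

theorem pvPassA_lt (s : List Char) (h : (pvPassA s).2 = true) :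
    ((pvPassA s).1).length < s.length := by
  rcases pvPass_lt pvPrefixes (by decide) s false h with h1 | h1
  · exact absurd h1 (by decide)
  · exact h1

-- A's 'while changed:' loop (enters at least once since changed starts True)
def pvLoopA (s : List Char) : List Char :=
  let r := pvPassA s
  if h : r.2 = true then pvLoopA r.1 else r.1
termination_by s.length
decreasing_by exact pvPassA_lt s h

def strip_tool_prefix (name : String) : String := String.ofList (pvLoopA name.toList)

-- ===== PORT B =====
-- Source B's loop: advance index i while name.startswith(prefix, i); return name[i:].
-- name.startswith(p, i) for 0 ≤ i is exactly p.toList.isPrefixOf (name.toList.drop i);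
-- name[i:] for 0 ≤ i is exactly List.drop i (exact, hand-ported).
def pvLoopB (name : List Char) (i : Nat) : List Char :=
  if h1 : ("boltffi_".toList).isPrefixOf (name.drop i) then pvLoopB name (i + 8)
  else if h2 : ("uniffi_".toList).isPrefixOf (name.drop i) then pvLoopB name (i + 7)
  else if h3 : ("wasmbindgen_".toList).isPrefixOf (name.drop i) then pvLoopB name (i + 12)
  else if h4 : ("ffm_".toList).isPrefixOf (name.drop i) then pvLoopB name (i + 4)
  else if h5 : ("java_".toList).isPrefixOf (name.drop i) then pvLoopB name (i + 5)
  else name.drop i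
termination_by name.length - i
decreasing_by
  all_goals {
    first
    | have hle := (List.isPrefixOf_iff_prefix.mp h1).length_le
    | have hle := (List.isPrefixOf_iff_prefix.mp h2).length_le
    | have hle := (List.isPrefixOf_iff_prefix.mp h3).length_le
    | have hle := (List.isPrefixOf_iff_prefix.mp h4).length_le
    | have hle := (List.isPrefixOf_iff_prefix.mp h5).length_le
    simp [List.length_drop] at hle ⊢
    omega }

def strip_tool_prefix_alt (name : String) : String := String.ofList (pvLoopB name.toList 0)

-- ===== PRECONDITION & SPEC =====
def Spec_strip_tool_prefix (name : String) (out : String) : Prop := out = strip_tool_prefix_alt name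
instance (name : String) (out : String) : Decidable (Spec_strip_tool_prefix name out) := by unfold Spec_strip_tool_prefix; infer_instance

-- ===== CLAIM (what is proved, stated in full; the proofs are below) =====
def Claim_equal_strip_tool_prefix : Prop := ∀ (name : String), Dom_strip_tool_prefix name → Spec_strip_tool_prefix name (strip_tool_prefix name)

-- ===== LEMMAS AND PROOFS =====

-- the common fixpoint: strip the (unique) matching prefix until none matches
def pvFix (s : List Char) : List Char :=
  if h1 : ("boltffi_".toList).isPrefixOf s then pvFix (s.drop 8)
  else if h2 : ("uniffi_".toList).isPrefixOf s then pvFix (s.drop 7)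
  else if h3 : ("wasmbindgen_".toList).isPrefixOf s then pvFix (s.drop 12)
  else if h4 : ("ffm_".toList).isPrefixOf s then pvFix (s.drop 4)
  else if h5 : ("java_".toList).isPrefixOf s then pvFix (s.drop 5)
  else s
termination_by s.length
decreasing_by
  all_goals {
    first
    | have hle := (List.isPrefixOf_iff_prefix.mp h1).length_le
    | have hle := (List.isPrefixOf_iff_prefix.mp h2).length_le
    | have hle := (List.isPrefixOf_iff_prefix.mp h3).length_le
    | have hle := (List.isPrefixOf_iff_prefix.mp h4).length_le
    | have hle := (List.isPrefixOf_iff_prefix.mp h5).length_le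
    simp [List.length_drop] at hle ⊢
    omega }

-- stripping any one of the prefixes preserves pvFix (the matching prefix is unique:
-- the five prefixes start with five distinct characters)
theorem pvFix_strip (p : List Char) (hp : p ∈ pvPrefixes) (s : List Char)
    (h : p.isPrefixOf s) : pvFix (s.drop p.length) = pvFix s := by
  obtain ⟨t, rfl⟩ := List.isPrefixOf_iff_prefix.mp h
  fin_cases hp <;> (conv_rhs => rw [pvFix]) <;> simp

-- a pass (any tail of A's inner for over the prefixes) preserves pvFix of the state
theorem pvFix_pass (ps : List (List Char)) (hps : ∀ p ∈ ps, p ∈ pvPrefixes) :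
    ∀ (t : List Char) (ch : Bool), pvFix ((ps.foldl pvPassStep (t, ch)).1) = pvFix t := by
  induction ps with
  | nil => intro t ch; rfl
  | cons p ps ih =>
    intro t ch
    simp only [List.foldl, pvPassStep]
    by_cases hp : p.isPrefixOf t
    · simp only [hp, if_pos]
      rw [ih (fun q hq => hps q (by simp [hq])) _ _]
      exact pvFix_strip p (hps p (by simp)) t hp
    · simp only [hp]
      exact ih (fun q hq => hps q (by simp [hq])) t ch

-- once changed is true it stays true
theorem pvPass_true (ps : List (List Char)) :
    ∀ (t : List Char), (ps.foldl pvPassStep (t, true)).2 = true := by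
  induction ps with
  | nil => intro t; rfl
  | cons p ps ih =>
    intro t
    simp only [List.foldl, pvPassStep]
    by_cases hp : p.isPrefixOf t <;> simp [hp, ih]

-- a pass that reports no change changed nothing and found no matching prefix
theorem pvPass_false (ps : List (List Char)) :
    ∀ (t : List Char), ((ps.foldl pvPassStep (t, false)).2 = false) →
      (ps.foldl pvPassStep (t, false)).1 = t ∧ ∀ p ∈ ps, ¬ p.isPrefixOf t := by
  induction ps with
  | nil => intro t _; exact ⟨rfl, by simp⟩
  | cons p ps ih =>
    intro t h
    simp only [List.foldl, pvPassStep] at h ⊢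
    by_cases hp : p.isPrefixOf t
    · simp only [hp, if_pos] at h
      have htrue := pvPass_true ps (t.drop p.length)
      rw [htrue] at h
      simp at h
    · simp only [hp] at h ⊢
      rcases ih t h with ⟨h1, h2⟩
      refine ⟨h1, ?_⟩
      intro q hq
      rcases List.mem_cons.mp hq with rfl | hq'
      · exact hp
      · exact h2 q hq'

theorem pvLoopA_eq_fix (s : List Char) : pvLoopA s = pvFix s := by
  fun_induction pvLoopA s with
  | case1 s r h ih =>
    rw [ih]
    exact pvFix_pass pvPrefixes (fun p hp => hp) s false
  | case2 s r h =>
    have h' : (pvPrefixes.foldl pvPassStep (s, false)).2 = false := by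
      simpa [pvPassA] using h
    rcases pvPass_false pvPrefixes s h' with ⟨h1, h2⟩
    show (pvPrefixes.foldl pvPassStep (s, false)).1 = pvFix s
    have nb : ¬ (['b','o','l','t','f','f','i','_'] <+: s) :=
      fun hpre => h2 _ (by decide) (List.isPrefixOf_iff_prefix.mpr hpre)
    have nu : ¬ (['u','n','i','f','f','i','_'] <+: s) :=
      fun hpre => h2 _ (by decide) (List.isPrefixOf_iff_prefix.mpr hpre)
    have nw : ¬ (['w','a','s','m','b','i','n','d','g','e','n','_'] <+: s) :=
      fun hpre => h2 _ (by decide) (List.isPrefixOf_iff_prefix.mpr hpre)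
    have nf : ¬ (['f','f','m','_'] <+: s) :=
      fun hpre => h2 _ (by decide) (List.isPrefixOf_iff_prefix.mpr hpre)
    have nj : ¬ (['j','a','v','a','_'] <+: s) :=
      fun hpre => h2 _ (by decide) (List.isPrefixOf_iff_prefix.mpr hpre)
    rw [h1, pvFix]
    simp [nb, nu, nw, nf, nj]

theorem pvLoopB_eq_fix (name : List Char) (i : Nat) :
    pvLoopB name i = pvFix (name.drop i) := by
  fun_induction pvLoopB name i with
  | case1 i h ih =>
    rw [ih]; conv_rhs => rw [pvFix]
    rw [dif_pos h, List.drop_drop]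
  | case2 i h1 h ih =>
    rw [ih]; conv_rhs => rw [pvFix]
    rw [dif_neg h1, dif_pos h, List.drop_drop]
  | case3 i h1 h2 h ih =>
    rw [ih]; conv_rhs => rw [pvFix]
    rw [dif_neg h1, dif_neg h2, dif_pos h, List.drop_drop]
  | case4 i h1 h2 h3 h ih =>
    rw [ih]; conv_rhs => rw [pvFix]
    rw [dif_neg h1, dif_neg h2, dif_neg h3, dif_pos h, List.drop_drop]
  | case5 i h1 h2 h3 h4 h ih =>
    rw [ih]; conv_rhs => rw [pvFix]
    rw [dif_neg h1, dif_neg h2, dif_neg h3, dif_neg h4, dif_pos h, List.drop_drop]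
  | case6 i h1 h2 h3 h4 h5 =>
    conv_rhs => rw [pvFix]
    rw [dif_neg h1, dif_neg h2, dif_neg h3, dif_neg h4, dif_neg h5]

-- ===== VERDICT (by name: the statement is the Claim_ definition above) =====
theorem strip_tool_prefix_spec : Claim_equal_strip_tool_prefix := by
  intro name _
  unfold Spec_strip_tool_prefix strip_tool_prefix strip_tool_prefix_alt
  rw [pvLoopA_eq_fix, pvLoopB_eq_fix]
  simp
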